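-- pv_equiv track=rewrite | github.com/aaryan0bb/dspy_financial_extraction | preprocessing/pdf_enricher.py | create_page_text_map
-- ===== SOURCE A (Python) =====
-- from typing import Dict, List, Tuple, NamedTuple, Optional, TYPE_CHECKING
--
-- PAGE_DELIMITER = "page_end"
--
-- def create_page_text_map(llm_text: str) -> Dict[int, str]:
--     """Create mapping from page numbers to text content."""
--     lines = llm_text.splitlines()
--     page_map: Dict[int, str] = {}
--     buffer: List[str] = []
--     page_num = 1
--
--     for line in lines:
--         if line.startswith(PAGE_DELIMITER):
--             page_map[page_num] = "\n".join(buffer)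
--             buffer = []
--             page_num += 1
--         else:
--             buffer.append(line)
--
--     if buffer:
--         page_map[page_num] = "\n".join(buffer)
--
--     return page_map
-- ===== SOURCE B (Python) =====
-- PAGE_DELIMITER = "page_end"
--
-- def create_page_text_map(llm_text: str):
--     """Index the delimiter lines once, then build each page by slicing."""
--     lines = llm_text.splitlines()
--     delims = [i for i, l in enumerate(lines) if l.startswith(PAGE_DELIMITER)]
--     page_map = {}
--     start = 0
--     for page_num, d in enumerate(delims, 1):
--         page_map[page_num] = "\n".join(lines[start:d])
--         start = d + 1
--     tail = lines[start:]
--     if tail: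
--         page_map[len(delims) + 1] = "\n".join(tail)
--     return page_map
-- ===== Notes on version B (the rewrite author's own statement) =====
-- stated objective: alternative
-- what changed: Replaces the per-line buffer/flush accumulator loop with a two-phase pass: first collect the indices of all delimiter lines, then build each page by slicing the line list between consecutive delimiter indices (tail page only if non-empty).
import Mathlib
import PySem

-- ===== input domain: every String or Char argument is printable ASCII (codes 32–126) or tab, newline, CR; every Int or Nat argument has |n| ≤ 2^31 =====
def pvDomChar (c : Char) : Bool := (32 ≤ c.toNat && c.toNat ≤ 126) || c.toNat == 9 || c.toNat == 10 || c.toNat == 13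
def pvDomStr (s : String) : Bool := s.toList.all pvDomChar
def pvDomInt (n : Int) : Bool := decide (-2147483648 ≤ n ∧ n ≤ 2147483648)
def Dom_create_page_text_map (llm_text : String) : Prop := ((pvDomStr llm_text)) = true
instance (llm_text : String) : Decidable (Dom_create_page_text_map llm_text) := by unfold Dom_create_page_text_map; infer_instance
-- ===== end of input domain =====

-- B replaces A's per-line buffer/flush loop with an index-the-delimiters-then-slice pass (alternative decomposition, same cost).

-- ===== PORT A =====
def create_page_text_map (llm_text : String) : List (Int × String) :=
  let lines := PySem.Str.splitlines llm_text
  let st := lines.foldl (fun (s : PySem.Dict Int String × List String × Int) line =>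
      if PySem.Str.startswith line "page_end" then
        (s.1.insert s.2.2 (PySem.Str.join "\n" s.2.1), ([], s.2.2 + 1))
      else (s.1, (s.2.1 ++ [line], s.2.2))) (PySem.Dict.empty, ([], 1))
  (if st.2.1 ≠ [] then st.1.insert st.2.2 (PySem.Str.join "\n" st.2.1) else st.1).items

-- ===== PORT B =====
def create_page_text_map_alt (llm_text : String) : List (Int × String) :=
  let lines := PySem.Str.splitlines llm_text
  let delims := ((PySem.List.enumerate lines 0).filter
      (fun p => PySem.Str.startswith p.2 "page_end")).map (·.1)
  let st := (PySem.List.enumerate delims 1).foldl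
      (fun (s : PySem.Dict Int String × Int) pd =>
        (s.1.insert pd.1 (PySem.Str.join "\n" (PySem.List.slice lines (some s.2) (some pd.2))),
         pd.2 + 1))
      (PySem.Dict.empty, 0)
  let tail := PySem.List.slice lines (some st.2) none
  (if tail ≠ [] then st.1.insert ((delims.length : Int) + 1) (PySem.Str.join "\n" tail) else st.1).items

-- ===== PRECONDITION & SPEC =====
def Spec_create_page_text_map (llm_text : String) (out : List (Int × String)) : Prop := out = create_page_text_map_alt llm_text
instance (llm_text : String) (out : List (Int × String)) : Decidable (Spec_create_page_text_map llm_text out) := by unfold Spec_create_page_text_map; infer_instance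

-- ===== CLAIM (what is proved, stated in full; the proofs are below) =====
def Claim_equal_create_page_text_map : Prop := ∀ (llm_text : String), Dom_create_page_text_map llm_text → Spec_create_page_text_map llm_text (create_page_text_map llm_text)

-- ===== LEMMAS AND PROOFS =====

/-- Split a line list at delimiter lines: one group per page (always nonempty). -/
def pvSplitD : List String → List (List String)
  | [] => [[]]
  | l :: ls =>
    if PySem.Str.startswith l "page_end" then [] :: pvSplitD ls
    else match pvSplitD ls with
      | [] => [[l]]
      | g :: gs => (l :: g) :: gs

/-- Number the groups from `p`, dropping a trailing empty group. -/
def pvNumber (p : Int) : List (List String) → List (Int × String)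
  | [] => []
  | g :: gs => match gs with
    | [] => if g = [] then [] else [(p, PySem.Str.join "\n" g)]
    | _ :: _ => (p, PySem.Str.join "\n" g) :: pvNumber (p + 1) gs

def pvMapFirst (f : List String → List String) : List (List String) → List (List String)
  | [] => []
  | g :: gs => f g :: gs

theorem pvSplitD_ne_nil (ls : List String) : pvSplitD ls ≠ [] := by
  cases ls with
  | nil => simp [pvSplitD]
  | cons l ls =>
    simp only [pvSplitD]
    split
    · simp
    · cases h : pvSplitD ls <;> simp

theorem pvFresh_insert (d : PySem.Dict Int String) (p : Int) (v : String)
    (H : ∀ q ∈ d.items, q.1 < p) :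
    (d.insert p v).items = d.items ++ [(p, v)] := by
  apply PySem.Dict.items_insert_of_not_contains
  rw [← Bool.not_eq_true, PySem.Dict.contains_iff_mem_keys]
  intro hmem
  simp only [PySem.Dict.keys, List.mem_map] at hmem
  obtain ⟨q, hq, hq1⟩ := hmem
  exact absurd (hq1 ▸ H q hq) (lt_irrefl p)

/-- A-side: the buffer/flush fold realizes `pvNumber` over `pvSplitD`. -/
theorem pvA_fold (ls : List String) :
    ∀ (d : PySem.Dict Int String) (buf : List String) (p : Int),
    (∀ q ∈ d.items, q.1 < p) →
    (let st := ls.foldl (fun (s : PySem.Dict Int String × List String × Int) line =>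
        if PySem.Str.startswith line "page_end" then
          (s.1.insert s.2.2 (PySem.Str.join "\n" s.2.1), ([], s.2.2 + 1))
        else (s.1, (s.2.1 ++ [line], s.2.2))) (d, (buf, p))
     (if st.2.1 ≠ [] then st.1.insert st.2.2 (PySem.Str.join "\n" st.2.1) else st.1).items)
    = d.items ++ pvNumber p (pvMapFirst (buf ++ ·) (pvSplitD ls)) := by
  induction ls with
  | nil =>
    intro d buf p H
    simp only [List.foldl_nil, pvSplitD, pvMapFirst, pvNumber]
    by_cases hb : buf = []
    · subst hb; simp
    · rw [List.append_nil, if_pos hb, pvFresh_insert d p _ H]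
      simp [hb]
  | cons l ls ih =>
    intro d buf p H
    simp only [List.foldl_cons]
    by_cases hd : PySem.Str.startswith l "page_end" = true
    · simp only [hd, if_pos]
      rw [ih (d.insert p (PySem.Str.join "\n" buf)) [] (p + 1)
        (by
          intro q hq
          rw [pvFresh_insert d p _ H] at hq
          rcases List.mem_append.1 hq with h | h
          · exact lt_trans (H q h) (by omega)
          · have h1 : q.1 = p := by rw [List.mem_singleton] at h; rw [h]
            omega)]
      rw [pvFresh_insert d p _ H]
      simp only [pvSplitD, hd, if_pos, List.append_assoc]
      have hne := pvSplitD_ne_nil ls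
      cases hsp : pvSplitD ls with
      | nil => exact absurd hsp hne
      | cons g gs =>
        simp [pvMapFirst, pvNumber]
    · rw [if_neg hd]
      rw [ih d (buf ++ [l]) p H]
      simp only [pvSplitD, if_neg hd]
      have hne := pvSplitD_ne_nil ls
      cases hsp : pvSplitD ls with
      | nil => exact absurd hsp hne
      | cons g gs => simp [pvMapFirst]

/-- Absolute delimiter indices of `ls`, enumerated from `s`. -/
def pvDIdx (s : Nat) (ls : List String) : List Int :=
  ((PySem.List.enumerate ls (s : Int)).filter
    (fun p => PySem.Str.startswith p.2 "page_end")).map (·.1)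

theorem pvTake_succ (full : List String) (start s : Nat) (l : String) (ls : List String)
    (hdrop : full.drop s = l :: ls) (hle : start ≤ s) :
    (full.drop start).take (s + 1 - start) = (full.drop start).take (s - start) ++ [l] := by
  have hs : s < full.length := by
    by_contra h
    rw [List.drop_eq_nil_of_le (by omega)] at hdrop
    exact absurd hdrop (by simp)
  have hget : (full.drop start)[s - start]? = some l := by
    rw [List.getElem?_drop]
    have : start + (s - start) = s := by omega
    rw [this]
    have := congrArg (·[0]?) hdrop
    simpa using this
  have hlen : s - start < (full.drop start).length := by
    rw [List.length_drop]; omega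
  have : s + 1 - start = (s - start) + 1 := by omega
  rw [this, List.take_add_one, hget]
  simp

/-- B-side: the slice fold over the delimiter index table realizes the same `pvNumber`. -/
theorem pvB_fold (full : List String) (ls : List String) :
    ∀ (s start : Nat) (d : PySem.Dict Int String) (p : Int),
    full.drop s = ls → start ≤ s →
    (∀ q ∈ d.items, q.1 < p) →
    (let st := (PySem.List.enumerate (pvDIdx s ls) p).foldl
        (fun (s : PySem.Dict Int String × Int) pd =>
          (s.1.insert pd.1 (PySem.Str.join "\n" (PySem.List.slice full (some s.2) (some pd.2))),
           pd.2 + 1))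
        (d, (start : Int))
     let tail := PySem.List.slice full (some st.2) none
     (if tail ≠ [] then st.1.insert (((pvDIdx s ls).length : Int) + p) (PySem.Str.join "\n" tail) else st.1).items)
    = d.items ++ pvNumber p (pvMapFirst ((PySem.List.slice full (some (start : Int)) (some (s : Int))) ++ ·) (pvSplitD ls)) := by
  induction ls with
  | nil =>
    intro s start d p hdrop hle H
    simp only [pvDIdx, PySem.List.enumerate_nil, List.filter_nil, List.map_nil,
      List.foldl_nil, List.length_nil, pvSplitD, pvMapFirst, pvNumber]
    rw [PySem.List.slice_from_natCast, PySem.List.slice_natCast]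
    have htail : full.drop start = (full.drop start).take (s - start) := by
      have hs : full.length ≤ s := by
        by_contra h
        have := congrArg List.length hdrop
        rw [List.length_drop] at this
        simp at this; omega
      rw [List.take_of_length_le (by rw [List.length_drop]; omega)]
    rw [← htail]
    by_cases hb : full.drop start = []
    · simp [hb]
    · rw [List.append_nil, if_pos hb, Int.natCast_zero, zero_add, pvFresh_insert d p _ H]
      simp [hb]
  | cons l tl ih =>
    intro s start d p hdrop hle H
    have hdrop' : full.drop (s + 1) = tl := by
      have h := congrArg List.tail hdrop
      simpa [List.tail_drop] using h
    by_cases hd : PySem.Str.startswith l "page_end" = true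
    · have hidx : pvDIdx s (l :: tl) = (s : Int) :: pvDIdx (s + 1) tl := by
        simp only [pvDIdx, PySem.List.enumerate_cons, List.filter_cons, hd, if_pos, List.map_cons]
        norm_cast
      rw [hidx]
      simp only [PySem.List.enumerate_cons, List.foldl_cons, List.length_cons]
      rw [show ((((pvDIdx (s + 1) tl).length + 1 : Nat)) : Int) + p
            = ((pvDIdx (s + 1) tl).length : Int) + (p + 1) from by push_cast; ring]
      rw [show ((s : Int) + 1) = (((s + 1 : Nat)) : Int) from by push_cast; ring]
      rw [ih (s + 1) (s + 1)
        (d.insert p (PySem.Str.join "\n" (PySem.List.slice full (some (start : Int)) (some (s : Int)))))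
        (p + 1)
        hdrop' (le_refl _)
        (by
          intro q hq
          rw [pvFresh_insert d p _ H] at hq
          rcases List.mem_append.1 hq with h | h
          · exact lt_trans (H q h) (by omega)
          · have h1 : q.1 = p := by rw [List.mem_singleton] at h; rw [h]
            omega)]
      rw [pvFresh_insert d p _ H]
      simp only [pvSplitD, hd, if_pos, List.append_assoc]
      have hne := pvSplitD_ne_nil tl
      cases hsp : pvSplitD tl with
      | nil => exact absurd hsp hne
      | cons g gs =>
        simp only [pvMapFirst, pvNumber, List.cons_append, List.nil_append]
        rw [PySem.List.slice_natCast]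
        have hz : PySem.List.slice full (some ((s + 1 : Nat) : Int)) (some ((s + 1 : Nat) : Int)) = [] := by
          rw [PySem.List.slice_natCast]; simp
        rw [hz]
        simp
    · have hidx : pvDIdx s (l :: tl) = pvDIdx (s + 1) tl := by
        simp only [pvDIdx, PySem.List.enumerate_cons, List.filter_cons, hd]
        norm_cast
      rw [hidx]
      rw [ih (s + 1) start d p hdrop' (by omega) H]
      simp only [pvSplitD, if_neg hd]
      have hne := pvSplitD_ne_nil tl
      cases hsp : pvSplitD tl with
      | nil => exact absurd hsp hne
      | cons g gs =>
        simp only [pvMapFirst]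
        rw [PySem.List.slice_natCast, PySem.List.slice_natCast,
          pvTake_succ full start s l tl hdrop hle]
        simp [List.append_assoc]

-- ===== VERDICT (by name: the statement is the Claim_ definition above) =====
theorem create_page_text_map_spec : Claim_equal_create_page_text_map := by
  intro llm_text _
  unfold Spec_create_page_text_map
  simp only [create_page_text_map, create_page_text_map_alt]
  have hA := pvA_fold (PySem.Str.splitlines llm_text) PySem.Dict.empty [] 1
    (by intro q hq; simp [PySem.Dict.empty] at hq)
  have hB := pvB_fold (PySem.Str.splitlines llm_text) (PySem.Str.splitlines llm_text) 0 0
    PySem.Dict.empty 1 rfl (le_refl _) (by intro q hq; simp [PySem.Dict.empty] at hq)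
  simp only [pvDIdx, Nat.cast_zero] at hB
  simp only at hA
  rw [hA, hB]
  have hslice : PySem.List.slice (PySem.Str.splitlines llm_text) (some (0 : Int)) (some (0 : Int)) = [] := by
    simpa using PySem.List.slice_natCast (PySem.Str.splitlines llm_text) 0 0
  rw [hslice]
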